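-- pv_equiv track=rewrite | github.com/tigrbl/tigrbl | pkgs/core/tigrbl_kernel/tigrbl_kernel/_build.py | _program_transport_kind_id
-- ===== SOURCE A (Python) =====
-- _TRANSPORT_KIND_GENERIC = 0
--
-- _TRANSPORT_KIND_REST = 1
--
-- _TRANSPORT_KIND_JSONRPC = 2
--
-- _TRANSPORT_KIND_CHANNEL = 3
--
-- def _program_transport_kind_id(proto_names: tuple[str, ...]) -> int:
--     has_jsonrpc = any(proto.endswith(".jsonrpc") for proto in proto_names)
--     has_rest = any(proto.endswith(".rest") for proto in proto_names)
--     has_channel = any(proto in {"ws", "wss", "webtransport"} for proto in proto_names)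
--     families = sum(1 for flag in (has_jsonrpc, has_rest, has_channel) if flag)
--     if families > 1:
--         return _TRANSPORT_KIND_GENERIC
--     if has_jsonrpc:
--         return _TRANSPORT_KIND_JSONRPC
--     if has_rest:
--         return _TRANSPORT_KIND_REST
--     if has_channel:
--         return _TRANSPORT_KIND_CHANNEL
--     return _TRANSPORT_KIND_GENERIC
-- ===== SOURCE B (Python) =====
-- def _program_transport_kind_id(proto_names):
--     kinds = set()
--     for proto in proto_names:
--         if proto.endswith(".jsonrpc"):
--             kinds.add(2)
--         elif proto.endswith(".rest"):
--             kinds.add(1)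
--         elif proto in ("ws", "wss", "webtransport"):
--             kinds.add(3)
--     if len(kinds) == 1:
--         return kinds.pop()
--     return 0
-- ===== Notes on version B (the rewrite author's own statement) =====
-- stated objective: alternative
-- what changed: One pass over the names classifying each into a set of detected kind ids, then a single size check on that set, instead of three separate any() scans plus a flag count and a priority cascade.
import Mathlib
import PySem

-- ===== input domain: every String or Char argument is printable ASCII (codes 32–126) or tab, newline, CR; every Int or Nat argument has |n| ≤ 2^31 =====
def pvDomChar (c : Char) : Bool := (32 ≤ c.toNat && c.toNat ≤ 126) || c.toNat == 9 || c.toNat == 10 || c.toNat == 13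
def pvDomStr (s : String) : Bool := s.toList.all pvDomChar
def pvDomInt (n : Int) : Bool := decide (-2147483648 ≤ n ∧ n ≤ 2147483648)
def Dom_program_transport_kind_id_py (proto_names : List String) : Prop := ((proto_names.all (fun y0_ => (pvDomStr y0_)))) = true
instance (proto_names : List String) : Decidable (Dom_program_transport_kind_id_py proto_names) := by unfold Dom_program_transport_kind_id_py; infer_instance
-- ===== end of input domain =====

-- B replaces A's three any() scans + flag count + priority cascade by one pass that
-- collects the detected kind ids into a set and then inspects that set's size (objective: alternative).

-- ===== PORT A =====
def program_transport_kind_id_py (proto_names : List String) : Int :=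
  let has_jsonrpc := proto_names.any (fun proto => PySem.Str.endswith proto ".jsonrpc")
  let has_rest := proto_names.any (fun proto => PySem.Str.endswith proto ".rest")
  let has_channel := proto_names.any (fun proto =>
    PySem.Set.contains (PySem.Set.ofList ["ws", "wss", "webtransport"]) proto)
  let families : Int :=
    [has_jsonrpc, has_rest, has_channel].foldl (fun acc flag => if flag then acc + 1 else acc) 0
  if families > 1 then 0
  else if has_jsonrpc then 2
  else if has_rest then 1
  else if has_channel then 3
  else 0

-- ===== PORT B =====
def pvKindOf (proto : String) : Option Int :=
  if PySem.Str.endswith proto ".jsonrpc" then some 2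
  else if PySem.Str.endswith proto ".rest" then some 1
  else if proto == "ws" || proto == "wss" || proto == "webtransport" then some 3
  else none

def program_transport_kind_id_py_alt (proto_names : List String) : Int :=
  let kinds : PySem.Set Int := proto_names.foldl (fun s proto =>
    match pvKindOf proto with
    | some k => PySem.Set.add s k
    | none => s) PySem.Set.empty
  -- kinds.pop() on a one-element set: the unique element (order-independent)
  if PySem.Set.len kinds == 1 then kinds.headD 0 else 0

-- ===== PRECONDITION & SPEC =====
def Spec_program_transport_kind_id_py (proto_names : List String) (out : Int) : Prop := out = program_transport_kind_id_py_alt proto_names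
instance (proto_names : List String) (out : Int) : Decidable (Spec_program_transport_kind_id_py proto_names out) := by unfold Spec_program_transport_kind_id_py; infer_instance

-- ===== CLAIM (what is proved, stated in full; the proofs are below) =====
def Claim_equal_program_transport_kind_id_py : Prop := ∀ (proto_names : List String), Dom_program_transport_kind_id_py proto_names → Spec_program_transport_kind_id_py proto_names (program_transport_kind_id_py proto_names)

-- ===== LEMMAS AND PROOFS =====

-- the three detections are mutually exclusive on every name
theorem pv_not_both_suffix (p : String)
    (h1 : PySem.Str.endswith p ".jsonrpc" = true)
    (h2 : PySem.Str.endswith p ".rest" = true) : False := by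
  rw [PySem.Str.endswith_eq, PySem.Chars.endswith_iff] at h1 h2
  rcases List.suffix_or_suffix_of_suffix h1 h2 with h | h <;> revert h <;> decide

theorem pvKindOf_eq_two (p : String) :
    pvKindOf p = some 2 ↔ PySem.Str.endswith p ".jsonrpc" = true := by
  unfold pvKindOf; split_ifs with h1 h2 h3 <;> simp_all

theorem pvKindOf_eq_one (p : String) :
    pvKindOf p = some 1 ↔ PySem.Str.endswith p ".rest" = true := by
  unfold pvKindOf
  constructor
  · intro h; split_ifs at h <;> simp_all
  · intro h
    have h1 : ¬ PySem.Str.endswith p ".jsonrpc" = true :=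
      fun hc => pv_not_both_suffix p hc h
    rw [PySem.Str.endswith_eq] at h h1
    simp only [show (".rest".toList) = ['.','r','e','s','t'] from rfl,
      show (".jsonrpc".toList) = ['.','j','s','o','n','r','p','c'] from rfl] at h h1
    simp [h, h1]

theorem pvKindOf_eq_three (p : String) :
    pvKindOf p = some 3 ↔ (p = "ws" ∨ p = "wss" ∨ p = "webtransport") := by
  constructor
  · intro h; unfold pvKindOf at h; split_ifs at h with h1 h2 h3 <;> simp_all
    tauto
  · rintro (rfl | rfl | rfl) <;> decide

theorem pvKindOf_cases (p : String) (k : Int) (h : pvKindOf p = some k) :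
    k = 1 ∨ k = 2 ∨ k = 3 := by
  unfold pvKindOf at h; split_ifs at h <;> simp_all

-- characterisation of the fold that builds B's set
theorem pv_mem_build (names : List String) (s : PySem.Set Int) (k : Int) :
    k ∈ names.foldl (fun s proto =>
      match pvKindOf proto with
      | some k => PySem.Set.add s k
      | none => s) s ↔ k ∈ s ∨ ∃ p ∈ names, pvKindOf p = some k := by
  induction names generalizing s with
  | nil => simp
  | cons p t ih =>
    simp only [List.foldl_cons, List.mem_cons]
    cases hk : pvKindOf p with
    | none =>
      simp only [ih]
      constructor
      · rintro (h | ⟨q, hq, hq2⟩)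
        · exact Or.inl h
        · exact Or.inr ⟨q, Or.inr hq, hq2⟩
      · rintro (h | ⟨q, (rfl | hq), hq2⟩)
        · exact Or.inl h
        · rw [hk] at hq2; exact absurd hq2 (by simp)
        · exact Or.inr ⟨q, hq, hq2⟩
    | some k' =>
      simp only [ih, PySem.Set.mem_add]
      constructor
      · rintro ((h | rfl) | ⟨q, hq, hq2⟩)
        · exact Or.inl h
        · exact Or.inr ⟨p, Or.inl rfl, hk⟩
        · exact Or.inr ⟨q, Or.inr hq, hq2⟩
      · rintro (h | ⟨q, (rfl | hq), hq2⟩)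
        · exact Or.inl (Or.inl h)
        · rw [hk] at hq2; exact Or.inl (Or.inr (Option.some_inj.mp hq2).symm)
        · exact Or.inr ⟨q, hq, hq2⟩

theorem pv_nodup_build (names : List String) (s : PySem.Set Int) (hs : s.Nodup) :
    (names.foldl (fun s proto =>
      match pvKindOf proto with
      | some k => PySem.Set.add s k
      | none => s) s).Nodup := by
  induction names generalizing s with
  | nil => exact hs
  | cons p t ih =>
    simp only [List.foldl_cons]
    cases hk : pvKindOf p with
    | none => simpa [hk] using ih s hs
    | some k' => simpa [hk] using ih _ (PySem.Set.nodup_add s k' hs)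

theorem pv_eq_singleton {S : List Int} {k : Int} (hnd : S.Nodup)
    (hmem : ∀ x, x ∈ S ↔ x = k) : S = [k] := by
  cases S with
  | nil => exact absurd ((hmem k).mpr rfl) (by simp)
  | cons a t =>
    have ha : a = k := (hmem a).mp (by simp)
    subst ha
    have : t = [] := by
      cases t with
      | nil => rfl
      | cons b u =>
        have hb : b = a := (hmem b).mp (by simp)
        simp [hb] at hnd
    simp [this]

theorem pv_len_ne_one {S : List Int} {a b : Int} (ha : a ∈ S) (hb : b ∈ S)
    (hab : a ≠ b) : S.length ≠ 1 := by
  intro h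
  rw [List.length_eq_one_iff] at h
  obtain ⟨x, rfl⟩ := h
  simp_all

-- ===== VERDICT (by name: the statement is the Claim_ definition above) =====
theorem program_transport_kind_id_py_spec : Claim_equal_program_transport_kind_id_py := by
  intro names _
  unfold Spec_program_transport_kind_id_py program_transport_kind_id_py program_transport_kind_id_py_alt
  simp only []
  set S := names.foldl (fun s proto =>
      match pvKindOf proto with
      | some k => PySem.Set.add s k
      | none => s) PySem.Set.empty with hS
  have hmem : ∀ k, k ∈ S ↔ ∃ p ∈ names, pvKindOf p = some k := by
    intro k; rw [hS, pv_mem_build]; simp [PySem.Set.empty]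
  have hnd : S.Nodup := pv_nodup_build names PySem.Set.empty (by simp [PySem.Set.empty])
  have hch : ∀ p : String,
      PySem.Set.contains (PySem.Set.ofList ["ws", "wss", "webtransport"]) p = true ↔
      (p = "ws" ∨ p = "wss" ∨ p = "webtransport") := by
    intro p
    simp [PySem.Set.contains, PySem.Set.ofList, PySem.Set.add, PySem.Set.empty]
  have h2 : ((2:Int) ∈ S) ↔ names.any (fun p => PySem.Str.endswith p ".jsonrpc") = true := by
    rw [hmem]; simp only [List.any_eq_true]
    exact ⟨fun ⟨p, hp, hk⟩ => ⟨p, hp, (pvKindOf_eq_two p).mp hk⟩,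
           fun ⟨p, hp, hk⟩ => ⟨p, hp, (pvKindOf_eq_two p).mpr hk⟩⟩
  have h1 : ((1:Int) ∈ S) ↔ names.any (fun p => PySem.Str.endswith p ".rest") = true := by
    rw [hmem]; simp only [List.any_eq_true]
    exact ⟨fun ⟨p, hp, hk⟩ => ⟨p, hp, (pvKindOf_eq_one p).mp hk⟩,
           fun ⟨p, hp, hk⟩ => ⟨p, hp, (pvKindOf_eq_one p).mpr hk⟩⟩
  have h3 : ((3:Int) ∈ S) ↔ names.any (fun p =>
      PySem.Set.contains (PySem.Set.ofList ["ws", "wss", "webtransport"]) p) = true := by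
    rw [hmem]; simp only [List.any_eq_true]
    exact ⟨fun ⟨p, hp, hk⟩ => ⟨p, hp, (hch p).mpr ((pvKindOf_eq_three p).mp hk)⟩,
           fun ⟨p, hp, hk⟩ => ⟨p, hp, (pvKindOf_eq_three p).mpr ((hch p).mp hk)⟩⟩
  have hsub : ∀ k, k ∈ S → k = 1 ∨ k = 2 ∨ k = 3 := by
    intro k hk; obtain ⟨p, _, hp⟩ := (hmem k).mp hk; exact pvKindOf_cases p k hp
  by_cases fj : names.any (fun p => PySem.Str.endswith p ".jsonrpc") = true <;>
  by_cases fr : names.any (fun p => PySem.Str.endswith p ".rest") = true <;>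
  by_cases fc : names.any (fun p =>
      PySem.Set.contains (PySem.Set.ofList ["ws", "wss", "webtransport"]) p) = true
  all_goals simp only [fj, fr, fc, Bool.not_eq_true] at *
  -- in each case determine S and both results
  · -- all three
    have := pv_len_ne_one (h2.mpr fj) (h1.mpr fr) (by decide)
    simp [PySem.Set.len, this]
  · -- jsonrpc + rest
    have := pv_len_ne_one (h2.mpr fj) (h1.mpr fr) (by decide)
    simp [PySem.Set.len, this]
  · -- jsonrpc + channel
    have := pv_len_ne_one (h2.mpr fj) (h3.mpr fc) (by decide)
    simp [PySem.Set.len, this]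
  · -- jsonrpc only
    have hSeq : S = [2] := pv_eq_singleton hnd (by
      intro x; constructor
      · intro hx; rcases hsub x hx with rfl | rfl | rfl
        · exact absurd (h1.mp hx) (by simp)
        · rfl
        · exact absurd (h3.mp hx) (by simp)
      · rintro rfl; exact h2.mpr fj)
    simp [hSeq, PySem.Set.len]
  · -- rest + channel
    have := pv_len_ne_one (h1.mpr fr) (h3.mpr fc) (by decide)
    simp [PySem.Set.len, this]
  · -- rest only
    have hSeq : S = [1] := pv_eq_singleton hnd (by
      intro x; constructor
      · intro hx; rcases hsub x hx with rfl | rfl | rfl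
        · rfl
        · exact absurd (h2.mp hx) (by simp)
        · exact absurd (h3.mp hx) (by simp)
      · rintro rfl; exact h1.mpr fr)
    simp [hSeq, PySem.Set.len]
  · -- channel only
    have hSeq : S = [3] := pv_eq_singleton hnd (by
      intro x; constructor
      · intro hx; rcases hsub x hx with rfl | rfl | rfl
        · exact absurd (h1.mp hx) (by simp)
        · exact absurd (h2.mp hx) (by simp)
        · rfl
      · rintro rfl; exact h3.mpr fc)
    simp [hSeq, PySem.Set.len]
  · -- none
    have hSeq : S = [] := by
      rw [List.eq_nil_iff_forall_not_mem]
      intro x hx; rcases hsub x hx with rfl | rfl | rfl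
      · exact absurd (h1.mp hx) (by simp)
      · exact absurd (h2.mp hx) (by simp)
      · exact absurd (h3.mp hx) (by simp)
    simp [hSeq, PySem.Set.len]
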